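-- pv_equiv track=rewrite | github.com/DonghakPark/TIL | Study_Algorithm/[pro]stack_sol.py | solution
-- ===== SOURCE A (Python) =====
-- def solution(s):
--     answer =0
--     Stack = []
--     for i in s:
--         Stack.append(i)
--         if len(Stack) <= 1:
--             continue
--         else:
--             if Stack[-1] == Stack[-2]:
--                 Stack.pop()
--                 Stack.pop()
--     if len(Stack) == 0:
--         answer =1
--
--     return answer
-- ===== SOURCE B (Python) =====
-- def solution(s):
--     # Repeatedly delete the first adjacent equal pair and rescan until none remains.
--     t = list(s)
--     found = True
--     while found:
--         found = False
--         for i in range(len(t) - 1):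
--             if t[i] == t[i + 1]:
--                 del t[i:i + 2]
--                 found = True
--                 break
--     return 1 if not t else 0
-- ===== Notes on version B (the rewrite author's own statement) =====
-- stated objective: alternative
-- what changed: Replaces the single-pass stack (push each char, pop when the top two match) by repeated deletion of the first adjacent equal pair with a full rescan until the string is irreducible, relying on confluence of adjacent-pair cancellation.
import Mathlib
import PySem

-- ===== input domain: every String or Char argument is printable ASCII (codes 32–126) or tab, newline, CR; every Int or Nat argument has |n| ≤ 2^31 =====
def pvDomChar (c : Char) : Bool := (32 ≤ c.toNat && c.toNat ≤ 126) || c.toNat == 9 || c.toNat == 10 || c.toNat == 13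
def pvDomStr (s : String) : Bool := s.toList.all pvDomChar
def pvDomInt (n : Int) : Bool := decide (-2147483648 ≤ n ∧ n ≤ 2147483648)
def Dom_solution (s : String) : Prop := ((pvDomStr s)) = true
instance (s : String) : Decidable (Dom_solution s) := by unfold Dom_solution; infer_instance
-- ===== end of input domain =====

-- B replaces the one-pass stack by repeated deletion of the first adjacent equal pair
-- with a rescan until the string is irreducible (alternative decomposition, not faster).

-- ===== PORT A =====
-- one iteration of A's for-loop: append i, then pop the top two if they are equal
def solutionStep (st : List Char) (c : Char) : List Char :=
  let st' := st ++ [c]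
  if st'.length ≤ 1 then st'
  else
    if PySem.List.pyGet? st' (-1) = PySem.List.pyGet? st' (-2) then
      st'.dropLast.dropLast
    else st'

def solution (s : String) : Int :=
  let answer : Int := 0
  let stack := s.toList.foldl solutionStep []
  let answer := if stack.length = 0 then (1 : Int) else answer
  answer

-- ===== PORT B =====
-- Source B's inner for-loop: delete the first adjacent equal pair, if any (None = no pair found)
def delFirst : List Char → Option (List Char)
  | a :: b :: r => if a = b then some r else (delFirst (b :: r)).map (a :: ·)
  | _ => none

-- termination measure for reduceB's while-loop
theorem delFirst_length : ∀ t t', delFirst t = some t' → t'.length + 2 = t.length := by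
  intro t
  induction t with
  | nil => intro t' h; simp [delFirst] at h
  | cons a r ih =>
    intro t' h
    match r, h with
    | b :: r', h =>
      by_cases hab : a = b
      · simp [delFirst, hab] at h
        subst h; simp
      · simp [delFirst, hab] at h
        obtain ⟨u, hu, rfl⟩ := h
        have := ih u hu
        simp at this ⊢
        omega

-- Source B's while-loop: repeat until a full scan finds no adjacent equal pair
def reduceB (t : List Char) : List Char :=
  match h : delFirst t with
  | some t' => reduceB t'
  | none => t
termination_by t.length
decreasing_by have := delFirst_length t t' h; omega

def solution_alt (s : String) : Int :=
  if reduceB s.toList = [] then 1 else 0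

-- ===== PRECONDITION & SPEC =====
def Spec_solution (s : String) (out : Int) : Prop := out = solution_alt s
instance (s : String) (out : Int) : Decidable (Spec_solution s out) := by unfold Spec_solution; infer_instance

-- ===== CLAIM (what is proved, stated in full; the proofs are below) =====
def Claim_equal_solution : Prop := ∀ (s : String), Dom_solution s → Spec_solution s (solution s)

-- ===== LEMMAS AND PROOFS =====

-- pushing a char distinct from the top just appends it
theorem step_push (st : List Char) (c : Char) (h : st.getLast? ≠ some c) :
    solutionStep st c = st ++ [c] := by
  unfold solutionStep
  match st with
  | [] => simp
  | x :: xs =>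
    have hlen : ¬ ((x :: xs) ++ [c]).length ≤ 1 := by simp
    simp only [hlen, if_false]
    rw [PySem.List.pyGet?_neg_one_append_singleton]
    rw [PySem.List.pyGet?_neg_ofNat ((x :: xs) ++ [c]) 2 (by omega) (by simp)]
    have h2 : ((x :: xs) ++ [c])[((x :: xs) ++ [c]).length - 2]? = (x :: xs).getLast? := by
      have he : ((x :: xs) ++ [c]).length - 2 = (x :: xs).length - 1 := by simp
      rw [he, List.getElem?_append_left (by simp), ← List.getLast?_eq_getElem?]
    rw [h2]
    have : ¬ (some c = (x :: xs).getLast?) := fun hc => h hc.symm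
    simp [this]

-- pushing a char equal to the top cancels it
theorem step_pop (st : List Char) (c : Char) (h : st.getLast? = some c) :
    solutionStep st c = st.dropLast := by
  unfold solutionStep
  match st with
  | [] => simp at h
  | x :: xs =>
    have hlen : ¬ ((x :: xs) ++ [c]).length ≤ 1 := by simp
    simp only [hlen, if_false]
    rw [PySem.List.pyGet?_neg_one_append_singleton]
    rw [PySem.List.pyGet?_neg_ofNat ((x :: xs) ++ [c]) 2 (by omega) (by simp)]
    have h2 : ((x :: xs) ++ [c])[((x :: xs) ++ [c]).length - 2]? = (x :: xs).getLast? := by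
      have he : ((x :: xs) ++ [c]).length - 2 = (x :: xs).length - 1 := by simp
      rw [he, List.getElem?_append_left (by simp), ← List.getLast?_eq_getElem?]
    rw [h2, h, if_pos rfl]
    show ((x :: xs) ++ [c]).dropLast.dropLast = (x :: xs).dropLast
    rw [List.dropLast_concat]

-- a list with no adjacent equal pair has adjacent-distinct chain structure
theorem delFirst_none_chain : ∀ t : List Char, delFirst t = none → List.IsChain (· ≠ ·) t := by
  intro t
  induction t with
  | nil => intro; exact List.isChain_nil
  | cons a r ih =>
    intro h
    match r with
    | [] => exact List.isChain_singleton a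
    | b :: r' =>
      by_cases hab : a = b
      · simp [delFirst, hab] at h
      · simp [delFirst, hab] at h
        exact List.isChain_cons_cons.mpr ⟨hab, ih h⟩

-- folding an irreducible string over a compatible stack just appends it
theorem foldl_chain : ∀ (t st : List Char), List.IsChain (· ≠ ·) t →
    (∀ a, t.head? = some a → st.getLast? ≠ some a) →
    List.foldl solutionStep st t = st ++ t := by
  intro t
  induction t with
  | nil => intro st _ _; simp
  | cons a r ih =>
    intro st hch hhd
    have hpush : solutionStep st a = st ++ [a] := step_push st a (hhd a rfl)
    simp only [List.foldl_cons, hpush]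
    rw [ih (st ++ [a]) hch.tail]
    · simp
    · intro b hb hlast
      simp at hlast
      match r, hb with
      | c :: r2, hb =>
        simp at hb
        subst hb
        exact absurd hlast (List.rel_of_isChain_cons_cons hch)

-- deleting the first adjacent equal pair does not change the fold result
theorem foldl_delFirst : ∀ (t t' st : List Char), delFirst t = some t' →
    (∀ a, t.head? = some a → st.getLast? ≠ some a) →
    List.foldl solutionStep st t = List.foldl solutionStep st t' := by
  intro t
  induction t with
  | nil => intro t' st h; simp [delFirst] at h
  | cons a r ih =>
    intro t' st h hhd
    match r, h with
    | b :: r', h =>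
      have hpush : solutionStep st a = st ++ [a] := step_push st a (hhd a rfl)
      by_cases hab : a = b
      · simp [delFirst, hab] at h
        subst h; subst hab
        have hpop : solutionStep (st ++ [a]) a = st := by
          rw [step_pop (st ++ [a]) a (by simp)]; simp
        simp only [List.foldl_cons, hpush, hpop]
      · simp [delFirst, hab] at h
        obtain ⟨u, hu, rfl⟩ := h
        simp only [List.foldl_cons, hpush]
        apply ih u (st ++ [a]) hu
        intro x hx
        simp at hx
        subst hx
        simp [hab]

-- the stack fold computes exactly the fully reduced form
theorem foldl_eq_reduceB : ∀ (n : ℕ) (t : List Char), t.length ≤ n →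
    List.foldl solutionStep [] t = reduceB t := by
  intro n
  induction n with
  | zero =>
    intro t ht
    have ht0 : t = [] := List.eq_nil_of_length_eq_zero (Nat.le_zero.mp ht)
    subst ht0
    rw [reduceB]
    split
    · next t' h => simp [delFirst] at h
    · simp
  | succ n ih =>
    intro t ht
    rw [reduceB]
    split
    · next t' h =>
      rw [foldl_delFirst t t' [] h (by intro a _; simp)]
      exact ih t' (by have := delFirst_length t t' h; omega)
    · next h =>
      rw [foldl_chain t [] (delFirst_none_chain t h) (by intro a _; simp)]
      simp

-- ===== VERDICT (by name: the statement is the Claim_ definition above) =====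
theorem solution_spec : Claim_equal_solution := by
  intro s _
  unfold Spec_solution solution solution_alt
  rw [foldl_eq_reduceB s.toList.length s.toList le_rfl]
  simp [List.length_eq_zero_iff]
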